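-- pv_equiv track=rewrite | github.com/cryptolyrics/Elevate-Flow | agents/Pete/scripts/pete-nba-pipeline.py | summarize_prop_markets
-- ===== SOURCE A (Python) =====
-- from typing import Dict, Iterable, List, Optional, Set, Tuple
--
-- def normalize_market(value) -> str:
--     token = str(value or "").strip().lower().replace(" ", "")
--     aliases = {
--         "points": "PTS",
--         "pts": "PTS",
--         "rebounds": "REB",
--         "reb": "REB",
--         "assists": "AST",
--         "ast": "AST",
--         "steals": "STL",
--         "stl": "STL",
--         "blocks": "BLK",
--         "blk": "BLK",
--         "turnovers": "TOV",
--         "turnover": "TOV",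
--         "to": "TOV",
--         "tov": "TOV",
--         "threes": "3PM",
--         "3ptm": "3PM",
--         "3pm": "3PM",
--         "threepointersmade": "3PM",
--         "ptsreb": "PR",
--         "pr": "PR",
--         "ptsast": "PA",
--         "pa": "PA",
--         "rebast": "RA",
--         "ra": "RA",
--         "ptsrebast": "PRA",
--         "pra": "PRA",
--         "stlblk": "SB",
--         "sb": "SB",
--     }
--     return aliases.get(token, token.upper())
--
-- def summarize_prop_markets(candidates: List[dict]) -> Dict[str, int]:
--     counts: Dict[str, int] = {}
--     for row in candidates if isinstance(candidates, list) else []: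
--         if not isinstance(row, dict):
--             continue
--         market = normalize_market(row.get("market"))
--         if not market:
--             continue
--         counts[market] = int(counts.get(market, 0)) + 1
--     return dict(sorted(counts.items(), key=lambda item: item[0]))
-- ===== SOURCE B (Python) =====
-- _ALIAS_GROUPS = [
--     ("PTS", ("points", "pts")),
--     ("REB", ("rebounds", "reb")),
--     ("AST", ("assists", "ast")),
--     ("STL", ("steals", "stl")),
--     ("BLK", ("blocks", "blk")),
--     ("TOV", ("turnovers", "turnover", "to", "tov")),
--     ("3PM", ("threes", "3ptm", "3pm", "threepointersmade")),
--     ("PR", ("ptsreb", "pr")),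
--     ("PA", ("ptsast", "pa")),
--     ("RA", ("rebast", "ra")),
--     ("PRA", ("ptsrebast", "pra")),
--     ("SB", ("stlblk", "sb")),
-- ]
--
--
-- def _normalize(value):
--     # scan canonical groups instead of a flat alias dict
--     token = str(value or "").strip().lower().replace(" ", "")
--     for canon, aliases in _ALIAS_GROUPS:
--         if token in aliases:
--             return canon
--     return token.upper()
--
--
-- def summarize_prop_markets(candidates):
--     # sort-then-group: collect normalized labels, sort, count consecutive runs
--     rows = candidates if isinstance(candidates, list) else []
--     labels = sorted(
--         m
--         for row in rows
--         if isinstance(row, dict) and (m := _normalize(row.get("market")))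
--     )
--     result = {}
--     i = 0
--     n = len(labels)
--     while i < n:
--         j = i + 1
--         while j < n and labels[j] == labels[i]:
--             j += 1
--         result[labels[i]] = j - i
--         i = j
--     return result
-- ===== Notes on version B (the rewrite author's own statement) =====
-- stated objective: alternative
-- what changed: Replaces the hash-map count-then-sort-items strategy with collecting normalized labels into a flat list, sorting it and counting consecutive runs with a two-pointer scan (keys come out already ascending), and resolves aliases by scanning canonical groups instead of a flat alias dict.
import Mathlib
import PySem

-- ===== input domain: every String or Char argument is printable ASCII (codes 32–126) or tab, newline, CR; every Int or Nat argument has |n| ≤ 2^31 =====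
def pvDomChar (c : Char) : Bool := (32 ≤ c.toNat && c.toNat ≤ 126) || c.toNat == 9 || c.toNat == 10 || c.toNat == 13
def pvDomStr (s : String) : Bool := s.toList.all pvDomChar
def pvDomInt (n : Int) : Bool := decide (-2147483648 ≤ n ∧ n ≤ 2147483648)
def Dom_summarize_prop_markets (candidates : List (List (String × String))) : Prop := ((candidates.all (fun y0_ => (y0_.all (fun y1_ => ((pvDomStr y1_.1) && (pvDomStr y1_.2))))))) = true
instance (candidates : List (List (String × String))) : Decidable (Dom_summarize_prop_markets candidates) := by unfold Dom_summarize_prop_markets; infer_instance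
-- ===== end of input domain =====

-- B collects the normalized labels into a flat list, sorts it and counts consecutive runs
-- (with alias resolution by scanning canonical groups), instead of A's hash-map counting
-- followed by sorting the items; return values are proved equal.

-- ===== PORT A =====
-- A's normalize_market: flat alias dict with upper-cased fallback
def normalize_market (value : Option String) : String :=
  let token := PySem.Str.replace (PySem.Str.lower (PySem.Str.strip (value.getD ""))) " " ""
  let aliases : PySem.Dict String String := PySem.Dict.mk [("points", "PTS"), ("pts", "PTS"), ("rebounds", "REB"), ("reb", "REB"), ("assists", "AST"), ("ast", "AST"), ("steals", "STL"), ("stl", "STL"), ("blocks", "BLK"), ("blk", "BLK"), ("turnovers", "TOV"), ("turnover", "TOV"), ("to", "TOV"), ("tov", "TOV"), ("threes", "3PM"), ("3ptm", "3PM"), ("3pm", "3PM"), ("threepointersmade", "3PM"), ("ptsreb", "PR"), ("pr", "PR"), ("ptsast", "PA"), ("pa", "PA"), ("rebast", "RA"), ("ra", "RA"), ("ptsrebast", "PRA"), ("pra", "PRA"), ("stlblk", "SB"), ("sb", "SB")]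
  (aliases.get? token).getD (PySem.Str.upper token)

def summarize_prop_markets (candidates : List (List (String × String))) : List (String × Int) :=
  let counts : PySem.Dict String Int := candidates.foldl (fun counts row =>
      let market := normalize_market ((PySem.Dict.mk row).get? "market")
      if market = "" then counts
      else counts.insert market (counts.getD market 0 + 1))
    PySem.Dict.empty
  PySem.List.sorted counts.items (fun item => item.1) false

-- ===== PORT B =====
-- B's canonical alias groups, scanned in order (Source B's _ALIAS_GROUPS loop)
def pvAliasGroups : List (String × List String) := [
  ("PTS", ["points", "pts"]),
  ("REB", ["rebounds", "reb"]),
  ("AST", ["assists", "ast"]),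
  ("STL", ["steals", "stl"]),
  ("BLK", ["blocks", "blk"]),
  ("TOV", ["turnovers", "turnover", "to", "tov"]),
  ("3PM", ["threes", "3ptm", "3pm", "threepointersmade"]),
  ("PR", ["ptsreb", "pr"]),
  ("PA", ["ptsast", "pa"]),
  ("RA", ["rebast", "ra"]),
  ("PRA", ["ptsrebast", "pra"]),
  ("SB", ["stlblk", "sb"])]

def pvNormalize (value : Option String) : String :=
  let token := PySem.Str.replace (PySem.Str.lower (PySem.Str.strip (value.getD ""))) " " ""
  match pvAliasGroups.find? (fun g => g.2.contains token) with
  | some g => g.1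
  | none => PySem.Str.upper token

-- the flat list of non-empty normalized labels (Source B's generator expression)
def pvLabels (candidates : List (List (String × String))) : List String :=
  candidates.filterMap (fun row =>
    let m := pvNormalize ((PySem.Dict.mk row).get? "market")
    if m = "" then none else some m)

-- Source B's two-pointer run counting over the sorted label list
def pvRunCounts : List String → List (String × Int)
  | [] => []
  | x :: xs =>
      (x, ((xs.takeWhile (· == x)).length : Int) + 1) :: pvRunCounts (xs.dropWhile (· == x))
termination_by l => l.length
decreasing_by
  simpa using Nat.lt_succ_of_le (List.length_dropWhile_le _ _)

def summarize_prop_markets_alt (candidates : List (List (String × String))) : List (String × Int) :=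
  pvRunCounts (PySem.List.sorted (pvLabels candidates) (fun x => x) false)

-- ===== PRECONDITION & SPEC =====
def Spec_summarize_prop_markets (candidates : List (List (String × String))) (out : List (String × Int)) : Prop := out = summarize_prop_markets_alt candidates
instance (candidates : List (List (String × String))) (out : List (String × Int)) : Decidable (Spec_summarize_prop_markets candidates out) := by unfold Spec_summarize_prop_markets; infer_instance

-- ===== CLAIM (what is proved, stated in full; the proofs are below) =====
def Claim_equal_summarize_prop_markets : Prop := ∀ (candidates : List (List (String × String))), Dom_summarize_prop_markets candidates → Spec_summarize_prop_markets candidates (summarize_prop_markets candidates)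

-- ===== LEMMAS AND PROOFS =====

-- B's group scan resolves every token exactly as A's flat alias dict
lemma pvNormalize_eq (value : Option String) : pvNormalize value = normalize_market value := by
  unfold pvNormalize normalize_market
  generalize (PySem.Str.replace (PySem.Str.lower (PySem.Str.strip (value.getD ""))) " " "") = t
  by_cases h0 : t = "points"
  · subst h0; decide
  by_cases h1 : t = "pts"
  · subst h1; decide
  by_cases h2 : t = "rebounds"
  · subst h2; decide
  by_cases h3 : t = "reb"
  · subst h3; decide
  by_cases h4 : t = "assists"
  · subst h4; decide
  by_cases h5 : t = "ast"
  · subst h5; decide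
  by_cases h6 : t = "steals"
  · subst h6; decide
  by_cases h7 : t = "stl"
  · subst h7; decide
  by_cases h8 : t = "blocks"
  · subst h8; decide
  by_cases h9 : t = "blk"
  · subst h9; decide
  by_cases h10 : t = "turnovers"
  · subst h10; decide
  by_cases h11 : t = "turnover"
  · subst h11; decide
  by_cases h12 : t = "to"
  · subst h12; decide
  by_cases h13 : t = "tov"
  · subst h13; decide
  by_cases h14 : t = "threes"
  · subst h14; decide
  by_cases h15 : t = "3ptm"
  · subst h15; decide
  by_cases h16 : t = "3pm"
  · subst h16; decide
  by_cases h17 : t = "threepointersmade"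
  · subst h17; decide
  by_cases h18 : t = "ptsreb"
  · subst h18; decide
  by_cases h19 : t = "pr"
  · subst h19; decide
  by_cases h20 : t = "ptsast"
  · subst h20; decide
  by_cases h21 : t = "pa"
  · subst h21; decide
  by_cases h22 : t = "rebast"
  · subst h22; decide
  by_cases h23 : t = "ra"
  · subst h23; decide
  by_cases h24 : t = "ptsrebast"
  · subst h24; decide
  by_cases h25 : t = "pra"
  · subst h25; decide
  by_cases h26 : t = "stlblk"
  · subst h26; decide
  by_cases h27 : t = "sb"
  · subst h27; decide
  simp [pvAliasGroups, h0, Ne.symm h0, h1, Ne.symm h1, h2, Ne.symm h2, h3, Ne.symm h3, h4, Ne.symm h4, h5, Ne.symm h5, h6, Ne.symm h6, h7, Ne.symm h7, h8, Ne.symm h8, h9, Ne.symm h9, h10, Ne.symm h10, h11, Ne.symm h11, h12, Ne.symm h12, h13, Ne.symm h13, h14, Ne.symm h14, h15, Ne.symm h15, h16, Ne.symm h16, h17, Ne.symm h17, h18, Ne.symm h18, h19, Ne.symm h19, h20, Ne.symm h20, h21, Ne.symm h21, h22, Ne.symm h22, h23, Ne.symm h23, h24, Ne.symm h24, h25, Ne.symm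 h25, h26, Ne.symm h26, h27, Ne.symm h27, PySem.Dict.get?]

-- the label list written with A's normalizer (proof-only bridge)
def pvLabelsA (candidates : List (List (String × String))) : List String :=
  candidates.filterMap (fun row =>
    let m := normalize_market ((PySem.Dict.mk row).get? "market")
    if m = "" then none else some m)

lemma pvLabelsA_eq (candidates : List (List (String × String))) :
    pvLabelsA candidates = pvLabels candidates := by
  simp [pvLabelsA, pvLabels, pvNormalize_eq]

-- A's counting loop over rows is the counter of the flat label list
lemma pvFold_eq_counter (candidates : List (List (String × String))) (d : PySem.Dict String Int) :
    candidates.foldl (fun counts row =>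
      let market := normalize_market ((PySem.Dict.mk row).get? "market")
      if market = "" then counts
      else counts.insert market (counts.getD market 0 + 1)) d
    = (pvLabelsA candidates).foldl (fun d x => d.insert x (d.getD x 0 + 1)) d := by
  induction candidates generalizing d with
  | nil => simp [pvLabelsA]
  | cons row rest ih =>
      simp only [List.foldl_cons, pvLabelsA, List.filterMap_cons]
      by_cases h : normalize_market ((PySem.Dict.mk row).get? "market") = ""
      · simp [h, ih, pvLabelsA]
      · simp [h, ih, pvLabelsA]

-- elements dropped by dropWhile (== x) in a sorted list are strictly above x
lemma pv_lt_of_mem_dropWhile (x : String) (xs : List String)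
    (hx : ∀ y ∈ xs, x ≤ y) (hp : xs.Pairwise (· ≤ ·)) :
    ∀ y ∈ xs.dropWhile (· == x), x < y := by
  induction xs with
  | nil => simp
  | cons a l ih =>
      by_cases ha : a = x
      · subst ha
        rw [List.dropWhile_cons_of_pos (by simp)]
        exact ih (fun y hy => hx y (List.mem_cons_of_mem _ hy)) (List.Pairwise.of_cons hp)
      · rw [List.dropWhile_cons_of_neg (by simp [ha])]
        intro y hy
        rcases List.mem_cons.mp hy with rfl | hyl
        · exact lt_of_le_of_ne (hx y (by simp)) (Ne.symm ha)
        · exact lt_of_lt_of_le (lt_of_le_of_ne (hx a (by simp)) (Ne.symm ha))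
            ((List.pairwise_cons.mp hp).1 y hyl)

-- the core characterisation of B's run counting on a sorted list
lemma pvRunCounts_spec (s : List String) (hp : s.Pairwise (· ≤ ·)) :
    (pvRunCounts s).Pairwise (fun a b => a.1 < b.1)
    ∧ (∀ k, k ∈ (pvRunCounts s).map (·.1) ↔ k ∈ s)
    ∧ (∀ p ∈ pvRunCounts s, p = (p.1, (s.count p.1 : Int))) := by
  induction s using pvRunCounts.induct with
  | case1 => simp [pvRunCounts]
  | case2 x xs ih =>
      have hx : ∀ y ∈ xs, x ≤ y := (List.pairwise_cons.mp hp).1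
      have hpxs : xs.Pairwise (· ≤ ·) := (List.pairwise_cons.mp hp).2
      have hd : ∀ y ∈ xs.dropWhile (· == x), x < y := pv_lt_of_mem_dropWhile x xs hx hpxs
      have hpd : (xs.dropWhile (· == x)).Pairwise (· ≤ ·) :=
        hpxs.sublist (List.dropWhile_sublist _)
      obtain ⟨ihp, ihm, ihc⟩ := ih hpd
      have htx : ∀ y ∈ xs.takeWhile (· == x), y = x := by
        intro y hy
        simpa using List.mem_takeWhile_imp hy
      set t := xs.takeWhile (· == x) with ht
      set d := xs.dropWhile (· == x) with hdd
      have hsplit : xs = t ++ d := (List.takeWhile_append_dropWhile).symm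
      refine ⟨?_, ?_, ?_⟩
      · rw [pvRunCounts, ← ht, ← hdd]
        refine List.pairwise_cons.mpr ⟨?_, ihp⟩
        intro b hb
        exact hd _ ((ihm b.1).mp (List.mem_map_of_mem hb))
      · intro k
        rw [pvRunCounts, ← ht, ← hdd]
        simp only [List.map_cons, List.mem_cons, ihm]
        constructor
        · rintro (rfl | hk)
          · exact Or.inl rfl
          · exact Or.inr (hsplit ▸ List.mem_append_right t hk)
        · rintro (rfl | hk)
          · exact Or.inl rfl
          · rw [hsplit] at hk
            rcases List.mem_append.mp hk with hk | hk
            · exact Or.inl (htx _ hk)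
            · exact Or.inr hk
      · intro p hp'
        rw [pvRunCounts, ← ht, ← hdd] at hp'
        rcases List.mem_cons.mp hp' with rfl | hp'
        · simp only
          congr 1
          have h1 : t.count x = t.length :=
            List.count_eq_length.mpr (fun y hy => by simp [htx y hy])
          have h2 : d.count x = 0 :=
            List.count_eq_zero.mpr (fun h => lt_irrefl x (hd x h))
          have hcx : (x :: xs).count x = t.length + 1 := by
            rw [List.count_cons_self, hsplit, List.count_append, h1, h2]
          rw [hcx]; push_cast; ring
        · have hmem : p.1 ∈ d := (ihm p.1).mp (List.mem_map_of_mem hp')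
          have hne : p.1 ≠ x := fun h => lt_irrefl x (h ▸ hd _ hmem)
          have hcnt : (x :: xs).count p.1 = d.count p.1 := by
            have h0 : t.count p.1 = 0 :=
              List.count_eq_zero.mpr (fun h => hne (htx _ h))
            rw [List.count_cons_of_ne (Ne.symm hne), hsplit, List.count_append, h0,
              Nat.zero_add]
          rw [hcnt]
          exact ihc p hp'

-- ===== VERDICT (by name: the statement is the Claim_ definition above) =====
theorem summarize_prop_markets_spec : Claim_equal_summarize_prop_markets := by
  intro candidates _
  unfold Spec_summarize_prop_markets summarize_prop_markets summarize_prop_markets_alt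
  set L := pvLabels candidates with hL
  set s := PySem.List.sorted L (fun x => x) false with hs
  have hcounter := pvFold_eq_counter candidates PySem.Dict.empty
  rw [hcounter, pvLabelsA_eq, PySem.Dict.foldl_insert_getD_add_one_eq_counter]
  show PySem.List.sorted (PySem.Dict.counter L).items (fun item => item.1) false = pvRunCounts s
  rw [PySem.Dict.items_counter]
  have hps : s.Pairwise (· ≤ ·) := by
    simpa using PySem.List.sorted_pairwise (xs := L) (key := fun x => x)
  obtain ⟨hlt, hmem, hval⟩ := pvRunCounts_spec s hps
  have hsperm : s.Perm L := by
    rw [hs]; exact PySem.List.sorted_perm L _ false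
  have hself : pvRunCounts s
      = ((pvRunCounts s).map (·.1)).map (fun k => (k, (L.count k : Int))) := by
    rw [List.map_map]
    conv_lhs => rw [← List.map_id (pvRunCounts s)]
    apply List.map_congr_left
    intro p hp
    have h := hval p hp
    rw [hsperm.count_eq] at h
    simpa using h
  have hkeyslt : ((pvRunCounts s).map (·.1)).Pairwise (· < ·) :=
    List.Pairwise.map (f := fun p : String × Int => p.1) (S := (· < ·)) (fun _ _ h => h) hlt
  have hkeysnd : ((pvRunCounts s).map (·.1)).Nodup := hkeyslt.imp ne_of_lt
  have hkeysperm : ((pvRunCounts s).map (·.1)).Perm (PySem.Set.ofList L) := by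
    rw [List.perm_ext_iff_of_nodup hkeysnd (PySem.Set.nodup_ofList L)]
    intro k
    rw [hmem k, PySem.Set.mem_ofList, PySem.List.mem_sorted]
  have hperm : (pvRunCounts s).Perm
      ((PySem.Set.ofList L).map (fun k => (k, (L.count k : Int)))) := by
    rw [hself]
    exact hkeysperm.map _
  exact PySem.List.sorted_eq_of_perm_of_pairwise_lt _ _ (fun item => item.1) hperm hlt
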